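-- pv_equiv track=rewrite | github.com/greenblat/vlsistuff | vhdl2v/pybin/loadDb0.py | simplify0
-- ===== SOURCE A (Python) =====
-- def simplify0(Old,F0,F4):
--     New = Old[:]
--     for Key in F0:
--         if Key in New:
--             Ind = New.index(Key)
--             New.pop(Ind)
--     for Key in F4:
--         if Key in New:
--             Ind = New.index(Key)
--             New[Ind]=F4[Key]
--     return New
-- ===== SOURCE B (Python) =====
-- def simplify0(Old, F0, F4):
--     # Tally pending removals once, then one forward pass over Old that skips
--     # the first `count` occurrences of each tallied value; replacements are a
--     # scan-and-replace-first per F4 item (same sequential order as the dict).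
--     pending = {}
--     for k in F0:
--         pending[k] = pending.get(k, 0) + 1
--     New = []
--     for x in Old:
--         c = pending.get(x, 0)
--         if c != 0:
--             pending[x] = c - 1
--         else:
--             New.append(x)
--     for key, val in F4.items():
--         for j in range(len(New)):
--             if New[j] == key:
--                 New[j] = val
--                 break
--     return New
-- ===== Notes on version B (the rewrite author's own statement) =====
-- stated objective: alternative
-- what changed: Removal becomes a single forward pass over Old guided by a precomputed tally of F0 (instead of one linear membership+index+pop scan per F0 key), and replacement becomes a single scan-and-replace-first per F4 item instead of a membership test followed by a separate index scan.
import Mathlib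
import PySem

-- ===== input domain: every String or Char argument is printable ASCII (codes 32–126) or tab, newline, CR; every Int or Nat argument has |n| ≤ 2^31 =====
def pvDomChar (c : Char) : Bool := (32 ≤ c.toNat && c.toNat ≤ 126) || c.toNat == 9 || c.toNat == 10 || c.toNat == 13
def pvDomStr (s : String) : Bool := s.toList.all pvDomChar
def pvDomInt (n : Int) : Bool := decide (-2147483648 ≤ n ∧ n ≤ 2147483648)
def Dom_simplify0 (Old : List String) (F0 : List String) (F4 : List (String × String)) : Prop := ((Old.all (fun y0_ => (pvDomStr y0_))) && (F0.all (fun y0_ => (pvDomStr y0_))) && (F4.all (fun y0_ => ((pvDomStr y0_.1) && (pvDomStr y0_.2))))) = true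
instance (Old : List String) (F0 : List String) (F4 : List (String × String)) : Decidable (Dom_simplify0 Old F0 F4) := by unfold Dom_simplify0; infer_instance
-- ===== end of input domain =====

-- B replaces A's per-key membership+index+pop removal scans by one tallied forward pass
-- over Old, and the membership+index replacement by one scan-and-replace-first per F4 item
-- (objective: alternative decomposition of the same computation).
-- NOTE: A mutates no argument observably (it copies Old); equivalence is about the return value.
-- F4 is a Python dict, so its keys are distinct and F4[Key] is the value paired with Key.

-- ===== PORT A =====
-- 'if Key in New: New.pop(New.index(Key))'
def pvStepRemove (New : List String) (Key : String) : List String :=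
  if New.contains Key then
    match PySem.List.index? New Key with
    | some Ind =>
      match PySem.List.pop? New (Ind : Int) with
      | some r => r.2
      | none => New
    | none => New
  else New

-- 'if Key in New: New[New.index(Key)] = F4[Key]'
def pvStepReplace (New : List String) (Key val : String) : List String :=
  if New.contains Key then
    match PySem.List.index? New Key with
    | some Ind => New.set Ind val
    | none => New
  else New

def simplify0 (Old : List String) (F0 : List String) (F4 : List (String × String)) : List String :=
  let New := F0.foldl pvStepRemove Old
  F4.foldl (fun N kv => pvStepReplace N kv.1 kv.2) New

-- ===== PORT B =====
-- inner 'for j in range(len(New)): if New[j] == key: New[j] = val; break'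
def pvRepFirst : List String → String → String → List String
  | [], _, _ => []
  | x :: xs, key, val => if x == key then val :: xs else x :: pvRepFirst xs key val

def simplify0_alt (Old : List String) (F0 : List String) (F4 : List (String × String)) : List String :=
  let pending := F0.foldl (fun d k => d.insert k (d.getD k 0 + 1)) (PySem.Dict.empty : PySem.Dict String Int)
  let New := (Old.foldl
      (fun (p : List String × PySem.Dict String Int) x =>
        let c := p.2.getD x 0
        if c != 0 then (p.1, p.2.insert x (c - 1)) else (p.1 ++ [x], p.2))
      ([], pending)).1
  F4.foldl (fun N kv => pvRepFirst N kv.1 kv.2) New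

-- ===== PRECONDITION & SPEC =====
def Spec_simplify0 (Old : List String) (F0 : List String) (F4 : List (String × String)) (out : List String) : Prop := out = simplify0_alt Old F0 F4
instance (Old : List String) (F0 : List String) (F4 : List (String × String)) (out : List String) : Decidable (Spec_simplify0 Old F0 F4 out) := by unfold Spec_simplify0; infer_instance

-- ===== CLAIM (what is proved, stated in full; the proofs are below) =====
def Claim_equal_simplify0 : Prop := ∀ (Old : List String) (F0 : List String) (F4 : List (String × String)), Dom_simplify0 Old F0 F4 → Spec_simplify0 Old F0 F4 (simplify0 Old F0 F4)

-- ===== LEMMAS AND PROOFS =====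

-- Abstract skipping pass: drop each element while its pending count is nonzero.
def pvSkip (c : String → Int) : List String → List String
  | [] => []
  | x :: xs => if c x != 0 then pvSkip (fun y => if y = x then c y - 1 else c y) xs
               else x :: pvSkip c xs

theorem pvSkip_congr (l : List String) (c c' : String → Int) (h : ∀ y, c y = c' y) :
    pvSkip c l = pvSkip c' l := by
  induction l generalizing c c' with
  | nil => rfl
  | cons x xs ih =>
    have hupd : ∀ y, (if y = x then c y - 1 else c y) = (if y = x then c' y - 1 else c' y) := by
      intro y; by_cases hy : y = x <;> simp [hy, h x, h y]
    simp only [pvSkip, h x]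
    split
    · exact ih _ _ hupd
    · rw [ih _ _ h]

theorem pvSkip_zero (l : List String) (c : String → Int) (h : ∀ y, c y = 0) :
    pvSkip c l = l := by
  induction l with
  | nil => rfl
  | cons x xs ih => simp [pvSkip, h x, ih]

theorem pvSkip_incr (l : List String) (c : String → Int) (k : String)
    (hk : 0 ≤ c k) (hnn : ∀ y, 0 ≤ c y) :
    pvSkip (fun y => if y = k then c y + 1 else c y) l = pvSkip c (l.erase k) := by
  induction l generalizing c with
  | nil => rfl
  | cons x xs ih =>
    by_cases hx : x = k
    · subst hx
      have h1 : (c x + 1 != 0) = true := by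
        have := hnn x; simp [bne_iff_ne]; omega
      simp only [pvSkip, h1, if_true, List.erase_cons_head]
      exact pvSkip_congr _ _ _ (fun y => by
        by_cases hy : y = x
        · simp [hy]
        · simp [hy])
    · rw [List.erase_cons_tail (by simp [hx])]
      by_cases hc : c x = 0
      · have hL : ((if x = k then c x + 1 else c x) != 0) = false := by simp [hx, hc]
        have hR : (c x != 0) = false := by simp [hc]
        simp only [pvSkip, hL, hR, Bool.false_eq_true, if_false]
        rw [ih c hk hnn]
      · have hL : ((if x = k then c x + 1 else c x) != 0) = true := by simp [hx, hc]
        have hR : (c x != 0) = true := by simp [hc]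
        simp only [pvSkip, hL, hR, if_true]
        have hcomm : ∀ y, (if y = x then (if y = k then c y + 1 else c y) - 1
              else if y = k then c y + 1 else c y)
            = (if y = k then (if y = x then c y - 1 else c y) + 1
              else (if y = x then c y - 1 else c y)) := by
          intro y
          by_cases h2 : y = x
          · have h1 : ¬ y = k := fun h => hx (h2.symm.trans h)
            simp only [if_pos h2, if_neg h1]
          · by_cases h1 : y = k
            · simp only [if_neg h2, if_pos h1]
            · simp only [if_neg h2, if_neg h1]
        rw [pvSkip_congr _ _ _ hcomm]
        exact ih (fun z => if z = x then c z - 1 else c z)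
          (by have h2 : ¬ k = x := fun h => hx h.symm
              simpa [h2] using hk)
          (fun y => by
            by_cases h2 : y = x
            · subst h2; have h3 := hnn y; simp; omega
            · simpa [h2] using hnn y)

-- A's removal step is List.erase.
theorem pvStepRemove_eq_erase (N : List String) (k : String) :
    pvStepRemove N k = N.erase k := by
  induction N with
  | nil => simp [pvStepRemove]
  | cons x xs ih =>
    by_cases hx : x = k
    · subst hx
      have h0 : PySem.List.index? (x :: xs) x = some 0 := PySem.List.index?_cons_self x xs
      have hcont : (x :: xs).contains x = true := by simp
      unfold pvStepRemove
      rw [if_pos hcont, h0]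
      simp [PySem.List.pop?_zero_cons]
    · have hbe : (x == k) = false := by simp [hx]
      by_cases hm : k ∈ xs
      · obtain ⟨i, hi⟩ := (PySem.List.index?_isSome_iff (xs := xs) (v := k)).2 hm |>
          (fun h => Option.isSome_iff_exists.1 h)
        obtain ⟨hil, _, _⟩ := PySem.List.getElem_of_index?_eq_some hi
        have hpop : PySem.List.pop? xs (i : Int) = some (xs[i], xs.eraseIdx i) :=
          PySem.List.pop?_natCast xs i hil
        have hpop' : PySem.List.pop? (x :: xs) ((i + 1 : ℕ) : Int)
            = some ((x :: xs)[i+1]'(by simpa using Nat.succ_lt_succ hil), (x :: xs).eraseIdx (i+1)) :=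
          PySem.List.pop?_natCast (x :: xs) (i+1) (by simpa using Nat.succ_lt_succ hil)
        have hxs : pvStepRemove xs k = xs.eraseIdx i := by
          unfold pvStepRemove
          rw [if_pos (by simpa using hm), hi]
          simp only [hpop]
        have hidx : PySem.List.index? (x :: xs) k = some (i + 1) := by
          rw [PySem.List.index?_cons_of_ne xs hx, hi]; rfl
        have hcons : pvStepRemove (x :: xs) k = (x :: xs).eraseIdx (i + 1) := by
          unfold pvStepRemove
          rw [if_pos (by simp [hm]), hidx]
          simp only [hpop']
        rw [hcons, List.eraseIdx_cons_succ, List.erase_cons_tail (by simp [hx] : ¬(x == k) = true), ← ih, hxs]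
      · have hnm : k ∉ x :: xs := by
          simp only [List.mem_cons, not_or]
          exact ⟨fun h => hx h.symm, hm⟩
        unfold pvStepRemove
        rw [if_neg (by simpa using hnm), List.erase_of_not_mem hnm]

-- A's removal phase computes the skipping pass with F0's tallies.
theorem foldA_eq_pvSkip (F0 Old : List String) :
    F0.foldl pvStepRemove Old = pvSkip (fun k => ((F0.count k : ℕ) : Int)) Old := by
  induction F0 generalizing Old with
  | nil => exact (pvSkip_zero Old _ (fun y => by simp)).symm
  | cons k ks ih =>
    rw [List.foldl_cons, pvStepRemove_eq_erase, ih]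
    rw [← pvSkip_incr (c := fun y => ((ks.count y : ℕ) : Int)) Old k (by positivity) (fun y => by positivity)]
    exact (pvSkip_congr _ _ _ (fun y => by
      by_cases hy : y = k
      · simp only [hy, List.count_cons, BEq.rfl, if_true]
        push_cast
        ring
      · have h2 : ¬ k = y := fun h => hy h.symm
        simp [hy, h2])).symm

-- B's fold over Old computes the skipping pass with the dict's tallies.
theorem foldB_eq_pvSkip (Old : List String) (acc : List String) (d : PySem.Dict String Int) :
    (Old.foldl
      (fun (p : List String × PySem.Dict String Int) x =>
        let c := p.2.getD x 0
        if c != 0 then (p.1, p.2.insert x (c - 1)) else (p.1 ++ [x], p.2))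
      (acc, d)).1 = acc ++ pvSkip (fun k => d.getD k 0) Old := by
  induction Old generalizing acc d with
  | nil => simp [pvSkip]
  | cons x xs ih =>
    by_cases hc : d.getD x 0 = 0
    · have h1 : (d.getD x 0 != 0) = false := by simp [hc]
      simp only [List.foldl_cons, h1, Bool.false_eq_true, if_false, pvSkip]
      rw [ih]
      simp
    · have h1 : (d.getD x 0 != 0) = true := by simp [bne_iff_ne, hc]
      simp only [List.foldl_cons, h1, if_true, pvSkip]
      rw [ih]
      congr 1
      exact pvSkip_congr _ _ _ (fun y => by
        rw [PySem.Dict.getD_insert]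
        by_cases hy : y = x <;> simp [hy])

-- A's replacement step is B's scan-and-replace-first.
theorem pvStepReplace_eq_repFirst (N : List String) (k v : String) :
    pvStepReplace N k v = pvRepFirst N k v := by
  induction N with
  | nil => simp [pvStepReplace, pvRepFirst]
  | cons x xs ih =>
    by_cases hx : x = k
    · subst hx
      have h0 : PySem.List.index? (x :: xs) x = some 0 := PySem.List.index?_cons_self x xs
      have hcont : (x :: xs).contains x = true := by simp
      unfold pvStepReplace
      rw [if_pos hcont, h0]
      simp [pvRepFirst]
    · have hbe : (x == k) = false := by simp [hx]
      simp only [pvRepFirst, hbe, Bool.false_eq_true, if_false]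
      by_cases hm : k ∈ xs
      · obtain ⟨i, hi⟩ := Option.isSome_iff_exists.1 ((PySem.List.index?_isSome_iff (xs := xs) (v := k)).2 hm)
        have hidx : PySem.List.index? (x :: xs) k = some (i + 1) := by
          rw [PySem.List.index?_cons_of_ne xs hx, hi]; rfl
        have h1 : pvStepReplace xs k v = xs.set i v := by
          unfold pvStepReplace
          rw [if_pos (by simpa using hm), hi]
        have h2 : pvStepReplace (x :: xs) k v = x :: xs.set i v := by
          unfold pvStepReplace
          rw [if_pos (by simp [hm]), hidx]
          simp
        rw [h2, ← ih, h1]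
      · have hnm : k ∉ x :: xs := by
          simp only [List.mem_cons, not_or]
          exact ⟨fun h => hx h.symm, hm⟩
        have h1 : pvStepReplace xs k v = xs := by
          unfold pvStepReplace
          rw [if_neg (by simpa using hm)]
        rw [← ih, h1]
        unfold pvStepReplace
        rw [if_neg (by simpa using hnm)]

-- ===== VERDICT (by name: the statement is the Claim_ definition above) =====
theorem simplify0_spec : Claim_equal_simplify0 := by
  intro Old F0 F4 _
  unfold Spec_simplify0 simplify0 simplify0_alt
  dsimp only
  rw [foldB_eq_pvSkip, foldA_eq_pvSkip]
  have hcnt : ∀ k, (F0.foldl (fun d k => d.insert k (d.getD k 0 + 1))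
      (PySem.Dict.empty : PySem.Dict String Int)).getD k 0 = ((F0.count k : ℕ) : Int) := by
    intro k
    rw [PySem.Dict.getD_foldl_insert_add_one, PySem.Dict.getD_empty]
    simp
  rw [pvSkip_congr _ _ _ (fun y => (hcnt y).symm), List.nil_append]
  have hstep : (fun (N : List String) (kv : String × String) => pvStepReplace N kv.1 kv.2)
      = fun N kv => pvRepFirst N kv.1 kv.2 :=
    funext fun N => funext fun kv => pvStepReplace_eq_repFirst N kv.1 kv.2
  rw [hstep]
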